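-- pv_equiv track=rewrite | github.com/leaen/Codeeval-solutions | stack-implementation.py | solve
-- ===== SOURCE A (Python) =====
-- class Stack(object):
--     def __init__(self):
--         self.memory = []
--
--     def push(self, val):
--         self.memory += (val,)
--
--     def pop(self):
--         if len(self.memory) > 0:
--             ret = self.memory[-1]
--             del self.memory[-1]
--             return ret
--         else:
--             Exception("Stack empty cannot pop")
--
--     def items(self):
--         return len(self.memory)
--
-- def solve(problem):
--     output = []
--
--     # Create stack and push all items onto it.
--
--     stack = Stack()
--     for item in problem.strip().split(' '):
--         stack.push(item)
--
--     # Run through stack until it's empty, printing every 2nd item.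
--
--     printed_last = False
--     while (stack.items() > 0):
--         if (printed_last == False):
--             # We want to print this one.
--
--             output += (stack.pop(),)
--             printed_last = not printed_last
--
--         else:
--             # We don't want to print this one.
--
--             stack.pop()
--             printed_last = not printed_last
--
--     # Return solution as a string.
--
--     return ' '.join(output)
-- ===== SOURCE B (Python) =====
-- def every_other(tokens):
--     if not tokens:
--         return []
--     return [tokens[0]] + every_other(tokens[2:])
--
-- def solve(problem):
--     return ' '.join(every_other(problem.strip().split(' ')[::-1]))
-- ===== Notes on version B (the rewrite author's own statement) =====
-- stated objective: simpler
-- what changed: Replaces the list-backed Stack class and the flag-toggling pop loop with reversing the token list and a direct recursive take-every-second-element helper.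
import Mathlib
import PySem

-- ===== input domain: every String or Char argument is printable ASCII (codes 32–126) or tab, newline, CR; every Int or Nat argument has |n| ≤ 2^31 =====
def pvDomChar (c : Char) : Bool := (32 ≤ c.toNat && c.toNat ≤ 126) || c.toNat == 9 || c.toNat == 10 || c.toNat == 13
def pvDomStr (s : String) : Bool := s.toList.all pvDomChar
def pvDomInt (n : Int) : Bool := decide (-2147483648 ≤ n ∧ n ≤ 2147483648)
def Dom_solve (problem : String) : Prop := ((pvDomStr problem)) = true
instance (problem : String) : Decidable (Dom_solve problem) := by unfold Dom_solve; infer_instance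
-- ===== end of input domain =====

-- B replaces A's list-backed Stack class and flag-toggling pop loop with reversing
-- the token list and a direct recursive take-every-second-element helper (simpler).

-- ===== PORT A =====
-- the while loop: pop (= last element, delete last), printing every 2nd item
def solveLoop (mem : List String) (printedLast : Bool) (output : List String) : List String :=
  if h : mem.length > 0 then
    -- ret = self.memory[-1]; del self.memory[-1]
    let ret := mem.getLast (by intro hn; simp [hn] at h)
    if printedLast = false then
      solveLoop mem.dropLast true (output ++ [ret])
    else
      solveLoop mem.dropLast false output
  else output
termination_by mem.length
decreasing_by all_goals simpa using Nat.sub_lt h Nat.one_pos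

def solve (problem : String) : String :=
  -- stack = Stack(); for item in problem.strip().split(' '): stack.push(item)
  let stack := ((PySem.Str.split? (PySem.Str.strip problem) " ").getD []).foldl
    (fun memory item => memory ++ [item]) []
  -- while stack.items() > 0: … (accumulating output)
  let output := solveLoop stack false []
  PySem.Str.join " " output

-- ===== PORT B =====
def everyOther (tokens : List String) : List String :=
  match tokens with
  | [] => []                                  -- if not tokens: return []
  | [t] => [t]                                -- [tokens[0]] + every_other([])  (tokens[2:] = [])
  | t :: _ :: rest => t :: everyOther rest    -- [tokens[0]] + every_other(tokens[2:])

def solve_alt (problem : String) : String :=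
  PySem.Str.join " "
    (everyOther ((PySem.List.slice? ((PySem.Str.split? (PySem.Str.strip problem) " ").getD []) none none (-1)).getD []))

-- ===== PRECONDITION & SPEC =====
def Spec_solve (problem : String) (out : String) : Prop := out = solve_alt problem
instance (problem : String) (out : String) : Decidable (Spec_solve problem out) := by unfold Spec_solve; infer_instance

-- ===== CLAIM (what is proved, stated in full; the proofs are below) =====
def Claim_equal_solve : Prop := ∀ (problem : String), Dom_solve problem → Spec_solve problem (solve problem)

-- ===== LEMMAS AND PROOFS =====

theorem foldl_append_singleton (l acc : List String) :
    l.foldl (fun memory item => memory ++ [item]) acc = acc ++ l := by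
  induction l generalizing acc with
  | nil => simp [List.foldl]
  | cons x xs ih => simp [List.foldl, ih]

theorem solveLoop_acc (mem : List String) (b : Bool) (out : List String) :
    solveLoop mem b out = out ++ solveLoop mem b [] := by
  induction hn : mem.length using Nat.strong_induction_on generalizing mem b out with
  | _ n ih =>
    rw [solveLoop]
    conv_rhs => rw [solveLoop]
    by_cases h : mem.length > 0
    · have hlt : mem.dropLast.length < n := by
        simp [List.length_dropLast, hn]; omega
      simp only [h, dif_pos]
      cases b with
      | false =>
        rw [if_pos rfl, if_pos rfl]
        simp only [List.nil_append]
        have e1 := ih _ hlt mem.dropLast true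
          (out ++ [mem.getLast (by intro hnil; simp [hnil] at h)]) rfl
        have e2 := ih _ hlt mem.dropLast true
          [mem.getLast (by intro hnil; simp [hnil] at h)] rfl
        rw [e1, e2]
        simp
      | true =>
        rw [if_neg (by simp), if_neg (by simp),
          ih _ hlt mem.dropLast false out rfl]
    · simp [h]

theorem everyOther_cons (x : String) (l : List String) :
    everyOther (x :: l) = x :: everyOther (l.drop 1) := by
  cases l <;> rfl

theorem everyOther_tail_reverse (l : List String) :
    everyOther (l.reverse.drop 1) = everyOther (l.dropLast.reverse) := by
  cases l using List.reverseRecOn with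
  | nil => rfl
  | append_singleton l a => simp

theorem solveLoop_eq (mem : List String) :
    solveLoop mem false [] = everyOther mem.reverse ∧
    solveLoop mem true [] = everyOther mem.dropLast.reverse := by
  induction mem using List.reverseRecOn with
  | nil => constructor <;> (rw [solveLoop]; simp) <;> rfl
  | append_singleton l a ih =>
    have h : (l ++ [a]).length > 0 := by simp
    have hd : (l ++ [a]).dropLast = l := by simp
    constructor
    · rw [solveLoop, dif_pos h, if_pos rfl, solveLoop_acc, hd, ih.2]
      have hrev : (l ++ [a]).reverse = a :: l.reverse := by simp
      rw [hrev, everyOther_cons, everyOther_tail_reverse]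
      simp
    · rw [solveLoop, dif_pos h, if_neg (by simp), hd, ih.1]

-- ===== VERDICT (by name: the statement is the Claim_ definition above) =====
theorem solve_spec : Claim_equal_solve := by
  intro problem _
  unfold Spec_solve solve solve_alt
  rw [PySem.List.slice?_none_none_neg_one, foldl_append_singleton]
  simp [(solveLoop_eq _).1]
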